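-- pv_equiv track=rewrite | github.com/raeez/chiral-bar-cobar | compute/lib/modular_forms_shadow_engine.py | qm_basis_monomials
-- ===== SOURCE A (Python) =====
-- from typing import Any, Dict, List, Optional, Tuple
--
-- def qm_basis_monomials(weight: int) -> List[Tuple[int, int, int]]:
--     r"""List monomials E_2*^a * E_4^b * E_6^c with 2a + 4b + 6c = weight.
--
--     Returns list of (a, b, c) tuples.
--     """
--     if weight < 0 or weight % 2 != 0:
--         return []
--     result = []
--     for a in range(weight // 2 + 1):
--         rem = weight - 2 * a
--         for b in range(rem // 4 + 1):
--             rem2 = rem - 4 * b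
--             if rem2 >= 0 and rem2 % 6 == 0:
--                 c = rem2 // 6
--                 result.append((a, b, c))
--     return result
-- ===== SOURCE B (Python) =====
-- def qm_basis_monomials(weight):
--     """List monomials E_2*^a * E_4^b * E_6^c with 2a + 4b + 6c = weight.
--
--     Enumerates the free exponents (b, c), derives a in closed form (no
--     divisibility test needed), then orders the triples by (a, b).
--     """
--     if weight < 0 or weight % 2 != 0:
--         return []
--     pts = []
--     for b in range(weight // 4 + 1):
--         for c in range(weight // 6 + 1):
--             rem = weight - 4 * b - 6 * c
--             if rem >= 0:
--                 pts.append((rem // 2, b, c))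
--     return sorted(pts, key=lambda t: (t[0], t[1]))
-- ===== Notes on version B (the rewrite author's own statement) =====
-- stated objective: alternative
-- what changed: B enumerates the free exponents (b, c), derives a = (weight-4b-6c)//2 in closed form with no mod-6 divisibility test, and sorts the collected triples by (a, b), instead of A's scan over (a, b) that tests rem % 6 == 0 to recover c.
import Mathlib
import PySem

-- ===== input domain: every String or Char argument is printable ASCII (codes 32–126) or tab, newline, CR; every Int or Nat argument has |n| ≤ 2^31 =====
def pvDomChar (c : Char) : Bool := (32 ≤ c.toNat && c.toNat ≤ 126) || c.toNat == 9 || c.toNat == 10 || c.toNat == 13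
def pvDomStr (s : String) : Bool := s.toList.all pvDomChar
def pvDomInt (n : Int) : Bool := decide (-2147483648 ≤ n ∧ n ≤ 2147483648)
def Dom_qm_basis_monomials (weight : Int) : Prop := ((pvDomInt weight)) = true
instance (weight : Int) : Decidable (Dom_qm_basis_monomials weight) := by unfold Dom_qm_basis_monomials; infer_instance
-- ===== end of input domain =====

-- B enumerates the free exponents (b, c), derives a in closed form with no divisibility test, and sorts the triples by (a, b); proved equal to A on all inputs.

-- ===== PORT A =====
def qm_basis_monomials (weight : Int) : List (Int × Int × Int) :=
  if weight < 0 ∨ PySem.Int.mod weight 2 ≠ 0 then []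
  else
    (PySem.List.pyRange 0 (PySem.Int.floordiv weight 2 + 1)).foldl (fun result a =>
      let rem := weight - 2 * a
      (PySem.List.pyRange 0 (PySem.Int.floordiv rem 4 + 1)).foldl (fun result b =>
        let rem2 := rem - 4 * b
        if 0 ≤ rem2 ∧ PySem.Int.mod rem2 6 = 0 then
          result ++ [(a, b, PySem.Int.floordiv rem2 6)]
        else result) result) []

-- ===== PORT B =====
def qm_basis_monomials_alt (weight : Int) : List (Int × Int × Int) :=
  if weight < 0 ∨ PySem.Int.mod weight 2 ≠ 0 then []
  else
    let pts := (PySem.List.pyRange 0 (PySem.Int.floordiv weight 4 + 1)).foldl (fun pts b =>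
      (PySem.List.pyRange 0 (PySem.Int.floordiv weight 6 + 1)).foldl (fun pts c =>
        let rem := weight - 4 * b - 6 * c
        if 0 ≤ rem then pts ++ [(PySem.Int.floordiv rem 2, b, c)] else pts) pts) []
    PySem.List.sorted2 pts (fun t => t.1) (fun t => t.2.1)

-- ===== PRECONDITION & SPEC =====
def Spec_qm_basis_monomials (weight : Int) (out : List (Int × Int × Int)) : Prop := out = qm_basis_monomials_alt weight
instance (weight : Int) (out : List (Int × Int × Int)) : Decidable (Spec_qm_basis_monomials weight out) := by unfold Spec_qm_basis_monomials; infer_instance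

-- ===== CLAIM (what is proved, stated in full; the proofs are below) =====
def Claim_equal_qm_basis_monomials : Prop := ∀ (weight : Int), Dom_qm_basis_monomials weight → Spec_qm_basis_monomials weight (qm_basis_monomials weight)

-- ===== LEMMAS AND PROOFS =====

-- A's inner block of monomials for a fixed exponent a
def pvGA (w a : Int) : List (Int × Int × Int) :=
  ((PySem.List.pyRange 0 (PySem.Int.floordiv (w - 2 * a) 4 + 1)).filter
      (fun b => decide (0 ≤ w - 2 * a - 4 * b ∧ PySem.Int.mod (w - 2 * a - 4 * b) 6 = 0))).map
    (fun b => (a, b, PySem.Int.floordiv (w - 2 * a - 4 * b) 6))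

-- A's result (past the guard) as a flatMap
def pvLA (w : Int) : List (Int × Int × Int) :=
  (PySem.List.pyRange 0 (PySem.Int.floordiv w 2 + 1)).flatMap (pvGA w)

-- B's inner block of monomials for a fixed exponent b
def pvGB (w b : Int) : List (Int × Int × Int) :=
  ((PySem.List.pyRange 0 (PySem.Int.floordiv w 6 + 1)).filter
      (fun c => decide (0 ≤ w - 4 * b - 6 * c))).map
    (fun c => (PySem.Int.floordiv (w - 4 * b - 6 * c) 2, b, c))

-- B's unsorted pts list (past the guard) as a flatMap
def pvLB (w : Int) : List (Int × Int × Int) :=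
  (PySem.List.pyRange 0 (PySem.Int.floordiv w 4 + 1)).flatMap (pvGB w)

theorem pvA_eq (w : Int) :
    qm_basis_monomials w = if w < 0 ∨ PySem.Int.mod w 2 ≠ 0 then [] else pvLA w := by
  unfold qm_basis_monomials
  split_ifs with h
  · rfl
  · have hstep : (fun (result : List (Int × Int × Int)) (a : Int) =>
        (PySem.List.pyRange 0 (PySem.Int.floordiv (w - 2 * a) 4 + 1)).foldl (fun result b =>
          if 0 ≤ (w - 2 * a) - 4 * b ∧ PySem.Int.mod ((w - 2 * a) - 4 * b) 6 = 0 then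
            result ++ [(a, b, PySem.Int.floordiv ((w - 2 * a) - 4 * b) 6)]
          else result) result)
      = (fun result a => result ++ pvGA w a) := by
      funext result a
      have hfun : (fun (result : List (Int × Int × Int)) (b : Int) =>
          if 0 ≤ (w - 2 * a) - 4 * b ∧ PySem.Int.mod ((w - 2 * a) - 4 * b) 6 = 0 then
            result ++ [(a, b, PySem.Int.floordiv ((w - 2 * a) - 4 * b) 6)]
          else result)
        = (fun (acc : List (Int × Int × Int)) (b : Int) =>
            if (fun b => decide (0 ≤ w - 2 * a - 4 * b ∧ PySem.Int.mod (w - 2 * a - 4 * b) 6 = 0)) b = true then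
              acc ++ [(fun b => ((a, b, PySem.Int.floordiv (w - 2 * a - 4 * b) 6) : Int × Int × Int)) b]
            else acc) := by
        funext acc b
        by_cases hb : 0 ≤ w - 2 * a - 4 * b ∧ PySem.Int.mod (w - 2 * a - 4 * b) 6 = 0
        · simp
        · simp
      rw [hfun, PySem.List.foldl_append_if]
      rfl
    rw [hstep, PySem.List.foldl_append_eq_flatMap]
    rfl

theorem pvB_eq (w : Int) :
    qm_basis_monomials_alt w = if w < 0 ∨ PySem.Int.mod w 2 ≠ 0 then []
      else PySem.List.sorted2 (pvLB w) (fun t => t.1) (fun t => t.2.1) := by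
  unfold qm_basis_monomials_alt
  split_ifs with h
  · rfl
  · have hstep : (fun (pts : List (Int × Int × Int)) (b : Int) =>
        (PySem.List.pyRange 0 (PySem.Int.floordiv w 6 + 1)).foldl (fun pts c =>
          if 0 ≤ w - 4 * b - 6 * c then
            pts ++ [(PySem.Int.floordiv (w - 4 * b - 6 * c) 2, b, c)]
          else pts) pts)
      = (fun pts b => pts ++ pvGB w b) := by
      funext pts b
      have hfun : (fun (pts : List (Int × Int × Int)) (c : Int) =>
          if 0 ≤ w - 4 * b - 6 * c then
            pts ++ [(PySem.Int.floordiv (w - 4 * b - 6 * c) 2, b, c)]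
          else pts)
        = (fun (acc : List (Int × Int × Int)) (c : Int) =>
            if (fun c => decide (0 ≤ w - 4 * b - 6 * c)) c = true then
              acc ++ [(fun c => ((PySem.Int.floordiv (w - 4 * b - 6 * c) 2, b, c) : Int × Int × Int)) c]
            else acc) := by
        funext acc c
        by_cases hc : 0 ≤ w - 4 * b - 6 * c
        · simp
        · simp
      rw [hfun, PySem.List.foldl_append_if]
      rfl
    rw [hstep, PySem.List.foldl_append_eq_flatMap]
    rfl

theorem pv_pyRange_pairwise (a b : Int) : (PySem.List.pyRange a b).Pairwise (· < ·) := by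
  simp only [PySem.List.pyRange, if_neg (by norm_num : ¬ (1:Int) = 0)]
  refine List.Pairwise.map _ ?_ List.pairwise_lt_range
  intro k1 k2 h
  omega

theorem pv_mem_LA (w : Int) (x : Int × Int × Int) :
    x ∈ pvLA w ↔ 0 ≤ x.1 ∧ 0 ≤ x.2.1 ∧ 0 ≤ x.2.2 ∧ 2 * x.1 + 4 * x.2.1 + 6 * x.2.2 = w := by
  obtain ⟨a, b, c⟩ := x
  simp only [pvLA, pvGA, List.mem_flatMap, List.mem_map, List.mem_filter,
    PySem.List.mem_pyRange_one, PySem.Int.floordiv_eq_ediv_of_pos (by norm_num : (0:Int) < 2),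
    PySem.Int.floordiv_eq_ediv_of_pos (by norm_num : (0:Int) < 4),
    PySem.Int.floordiv_eq_ediv_of_pos (by norm_num : (0:Int) < 6),
    PySem.Int.mod_eq_emod_of_pos (by norm_num : (0:Int) < 6),
    decide_eq_true_eq, Prod.mk.injEq]
  constructor
  · rintro ⟨a', ha', b', ⟨⟨hb', hcond⟩, rfl, rfl, rfl⟩⟩
    omega
  · rintro ⟨ha, hb, hc, hsum⟩
    exact ⟨a, by omega, b, ⟨⟨by omega, by omega⟩, rfl, rfl, by omega⟩⟩

theorem pv_mem_LB (w : Int) (he : w % 2 = 0) (x : Int × Int × Int) :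
    x ∈ pvLB w ↔ 0 ≤ x.1 ∧ 0 ≤ x.2.1 ∧ 0 ≤ x.2.2 ∧ 2 * x.1 + 4 * x.2.1 + 6 * x.2.2 = w := by
  obtain ⟨a, b, c⟩ := x
  simp only [pvLB, pvGB, List.mem_flatMap, List.mem_map, List.mem_filter,
    PySem.List.mem_pyRange_one, PySem.Int.floordiv_eq_ediv_of_pos (by norm_num : (0:Int) < 2),
    PySem.Int.floordiv_eq_ediv_of_pos (by norm_num : (0:Int) < 4),
    PySem.Int.floordiv_eq_ediv_of_pos (by norm_num : (0:Int) < 6),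
    decide_eq_true_eq, Prod.mk.injEq]
  constructor
  · rintro ⟨b', hb', c', ⟨⟨hc', hcond⟩, rfl, rfl, rfl⟩⟩
    omega
  · rintro ⟨ha, hb, hc, hsum⟩
    exact ⟨b, by omega, c, ⟨⟨by omega, by omega⟩, by omega, rfl, rfl⟩⟩

theorem pv_pairwise_LA (w : Int) :
    (pvLA w).Pairwise (fun x y => x.1 < y.1 ∨ (x.1 = y.1 ∧ x.2.1 < y.2.1)) := by
  rw [pvLA, List.pairwise_flatMap]
  constructor
  · intro a _
    rw [pvGA, List.pairwise_map]
    refine ((pv_pyRange_pairwise _ _).filter _).imp ?_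
    intro b1 b2 h
    exact Or.inr ⟨rfl, h⟩
  · refine (pv_pyRange_pairwise _ _).imp ?_
    intro a1 a2 h x hx y hy
    rw [pvGA] at hx hy
    simp only [List.mem_map, List.mem_filter] at hx hy
    obtain ⟨b1, _, rfl⟩ := hx
    obtain ⟨b2, _, rfl⟩ := hy
    exact Or.inl h

theorem pv_nodup_LA (w : Int) : (pvLA w).Nodup := by
  refine (pv_pairwise_LA w).imp ?_
  intro x y h
  rintro rfl
  omega

theorem pv_nodup_LB (w : Int) : (pvLB w).Nodup := by
  rw [pvLB, List.nodup_iff_pairwise_ne, List.pairwise_flatMap]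
  constructor
  · intro b _
    rw [pvGB, List.pairwise_map]
    refine ((pv_pyRange_pairwise _ _).filter _).imp ?_
    intro c1 c2 h
    simp only [ne_eq, Prod.mk.injEq, not_and]
    intro _ _
    omega
  · refine (pv_pyRange_pairwise _ _).imp ?_
    intro b1 b2 h x hx y hy
    rw [pvGB] at hx hy
    simp only [List.mem_map, List.mem_filter] at hx hy
    obtain ⟨c1, _, rfl⟩ := hx
    obtain ⟨c2, _, rfl⟩ := hy
    simp only [ne_eq, Prod.mk.injEq, not_and]
    intro _ hb
    omega

theorem pv_sorted2_eq_sorted_lex (xs : List (Int × Int × Int)) :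
    PySem.List.sorted2 xs (fun t => t.1) (fun t => t.2.1) =
      PySem.List.sorted xs (fun t => (toLex (t.1, t.2.1) : Lex (Int × Int))) := by
  rw [PySem.List.sorted_eq_foldl_insertBy, PySem.List.sorted2]
  simp only [Bool.false_eq_true, if_false]
  have hfun : (fun (a b : Int × Int × Int) =>
      decide (a.1 < b.1) || (!decide (b.1 < a.1) && decide (a.2.1 < b.2.1)))
    = (fun (a b : Int × Int × Int) =>
        decide ((toLex (a.1, a.2.1) : Lex (Int × Int)) < toLex (b.1, b.2.1))) := by
    funext a b
    rcases lt_trichotomy a.1 b.1 with h | h | h <;>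
      (simp [Prod.Lex.lt_iff, h]; try omega)
  rw [hfun]

-- ===== VERDICT (by name: the statement is the Claim_ definition above) =====
theorem qm_basis_monomials_spec : Claim_equal_qm_basis_monomials := by
  intro w _hdom
  unfold Spec_qm_basis_monomials
  rw [pvA_eq, pvB_eq]
  by_cases hg : w < 0 ∨ PySem.Int.mod w 2 ≠ 0
  · rw [if_pos hg, if_pos hg]
  · rw [if_neg hg, if_neg hg]
    push Not at hg
    have he : w % 2 = 0 := by
      have := hg.2
      rwa [PySem.Int.mod_eq_emod_of_pos (by norm_num : (0:Int) < 2)] at this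
    rw [pv_sorted2_eq_sorted_lex]
    refine (PySem.List.sorted_eq_of_perm_of_pairwise_lt _ _ _ ?_ ?_).symm
    · exact ((List.perm_ext_iff_of_nodup (pv_nodup_LA w) (pv_nodup_LB w)).2
        (fun x => by rw [pv_mem_LA w x, pv_mem_LB w he x]))
    · refine (pv_pairwise_LA w).imp ?_
      intro x y h
      rw [Prod.Lex.lt_iff]
      simpa using h
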